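-- pv_equiv track=rewrite | github.com/boddugopikrishna/LearningOne | venv/All functions/Recusrion.py | concatPasswords
-- ===== SOURCE A (Python) =====
-- def concatPasswords(passwords,loginAttempt,output = None):
--     if output == None:
--         output = ""
--     for password in passwords:
--         if loginAttempt.startswith(password):
--             output = output + password
--             return concatPasswords(passwords,loginAttempt[len(password):],output)
--     if output == loginAttempt:
--         return output
--     else:
--         return "WRONG PASSWORD"
-- ===== SOURCE B (Python) =====
-- def concatPasswords(passwords, loginAttempt, output=None):
--     # Index-based greedy scan: keep a cursor into loginAttempt instead of
--     # slicing and re-concatenating strings at every step; build the result once.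
--     base = "" if output is None else output
--     i = 0
--     progressing = True
--     while progressing:
--         progressing = False
--         for p in passwords:
--             if loginAttempt.startswith(p, i):
--                 i += len(p)
--                 progressing = True
--                 break
--     out = base + loginAttempt[:i]
--     return out if out == loginAttempt[i:] else "WRONG PASSWORD"
-- ===== Notes on version B (the rewrite author's own statement) =====
-- stated objective: alternative
-- what changed: Replaces A's slice-and-concatenate tail recursion by an iterative cursor: a single index advances past each matched password over the unchanged string and the output string is built once at the end.
-- outside the precondition, e.g. on concatPasswords([''], 'a', None): A raises RecursionError, B does not finish within the time limit
import Mathlib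
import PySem

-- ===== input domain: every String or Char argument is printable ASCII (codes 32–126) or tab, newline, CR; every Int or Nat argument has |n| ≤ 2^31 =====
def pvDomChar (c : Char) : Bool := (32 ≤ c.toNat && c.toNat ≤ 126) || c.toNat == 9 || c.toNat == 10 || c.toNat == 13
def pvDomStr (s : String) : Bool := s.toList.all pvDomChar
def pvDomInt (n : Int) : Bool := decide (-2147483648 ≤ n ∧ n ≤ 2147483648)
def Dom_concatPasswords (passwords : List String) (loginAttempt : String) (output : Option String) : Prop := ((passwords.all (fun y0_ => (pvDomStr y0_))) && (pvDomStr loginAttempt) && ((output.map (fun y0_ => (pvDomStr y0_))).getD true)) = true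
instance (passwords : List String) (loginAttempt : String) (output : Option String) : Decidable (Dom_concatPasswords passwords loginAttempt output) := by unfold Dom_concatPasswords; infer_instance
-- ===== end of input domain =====

-- B replaces A's slice-and-concatenate tail recursion by a single index cursor
-- advanced over the unchanged string, building the output once at the end (objective: alternative).
-- A raises RecursionError whenever "" ∈ passwords (B loops forever there); Pre_ excludes it.

-- ===== PORT A =====
-- the 'for password in passwords: if loginAttempt.startswith(password) …' scan with early exit:
-- returns the first password that is a prefix of the remaining attempt (strings as their char lists;
-- isPrefixOf is exactly startswith)
def pvAScan (ps : List String) (rest : List Char) : Option String :=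
  match ps with
  | [] => none
  | p :: tl => if p.toList.isPrefixOf rest then some p else pvAScan tl rest

-- the tail recursion, fuelled for totality (each consumed password is nonempty under Pre_, so
-- length+1 fuel is never exhausted there); out is the accumulated 'output', rest is loginAttempt;
-- rest.drop p.toList.length is exactly loginAttempt[len(password):] (nonnegative slice-from)
def pvARec : Nat → List String → List Char → List Char → String
  | 0, _, _, out => String.ofList out        -- unreachable under Pre_
  | f+1, ps, rest, out =>
    match pvAScan ps rest with
    | some p => pvARec f ps (rest.drop p.toList.length) (out ++ p.toList)
    | none => if out = rest then String.ofList out else "WRONG PASSWORD"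

def concatPasswords (passwords : List String) (loginAttempt : String) (output : Option String) : String :=
  -- 'if output == None: output = ""' (recursive calls always pass a string, so hoisted once)
  let out := match output with | none => "" | some s => s
  pvARec (loginAttempt.toList.length + 1) passwords loginAttempt.toList out.toList

-- ===== PORT B =====
-- 'loginAttempt.startswith(p, i)': first password matching at cursor i (string untouched)
def pvBFind (ps : List String) (s : List Char) (i : Nat) : Option String :=
  match ps with
  | [] => none
  | p :: tl => if p.toList.isPrefixOf (s.drop i) then some p else pvBFind tl s i

-- the 'while progressing' loop: advance the cursor past each matched password; fuelled
def pvBLoop (ps : List String) (s : List Char) : Nat → Nat → Nat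
  | 0, i => i                             -- unreachable under Pre_
  | f+1, i =>
    match pvBFind ps s i with
    | some p => pvBLoop ps s f (i + p.toList.length)
    | none => i

def concatPasswords_alt (passwords : List String) (loginAttempt : String) (output : Option String) : String :=
  let base := match output with | none => "" | some s => s
  let cs := loginAttempt.toList
  let j := pvBLoop passwords cs (cs.length + 1) 0
  let out := base.toList ++ cs.take j     -- base + loginAttempt[:i], built once
  if out = cs.drop j then String.ofList out else "WRONG PASSWORD"

-- ===== PRECONDITION & SPEC =====
-- Pre_ excludes password lists containing the empty string: there A always ends up matching ""
-- forever and raises RecursionError (B's loop likewise never terminates).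
def Pre_concatPasswords (passwords : List String) (loginAttempt : String) (output : Option String) : Prop :=
  "" ∉ passwords
instance (passwords : List String) (loginAttempt : String) (output : Option String) : Decidable (Pre_concatPasswords passwords loginAttempt output) := by unfold Pre_concatPasswords; infer_instance

def pvWitness_concatPasswords : List String × String × Option String := (["ab", "a"], "aab", none)

def Spec_concatPasswords (passwords : List String) (loginAttempt : String) (output : Option String) (out : String) : Prop := out = concatPasswords_alt passwords loginAttempt output
instance (passwords : List String) (loginAttempt : String) (output : Option String) (out : String) : Decidable (Spec_concatPasswords passwords loginAttempt output out) := by unfold Spec_concatPasswords; infer_instance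

-- ===== CLAIM (what is proved, stated in full; the proofs are below) =====
def Claim_equal_concatPasswords : Prop := ∀ (passwords : List String) (loginAttempt : String) (output : Option String), Dom_concatPasswords passwords loginAttempt output → Pre_concatPasswords passwords loginAttempt output → Spec_concatPasswords passwords loginAttempt output (concatPasswords passwords loginAttempt output)

-- ===== LEMMAS AND PROOFS =====

theorem pvScan_eq_find (ps : List String) (s : List Char) (i : Nat) :
    pvAScan ps (s.drop i) = pvBFind ps s i := by
  induction ps with
  | nil => rfl
  | cons p tl ih => simp [pvAScan, pvBFind, ih]

theorem pvBFind_mem {ps : List String} {s : List Char} {i : Nat} {p : String}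
    (h : pvBFind ps s i = some p) : p ∈ ps := by
  induction ps with
  | nil => simp [pvBFind] at h
  | cons q tl ih =>
    simp only [pvBFind] at h
    split at h
    · cases h; exact List.mem_cons_self ..
    · exact List.mem_cons_of_mem _ (ih h)

theorem pvBFind_prefix {ps : List String} {s : List Char} {i : Nat} {p : String}
    (h : pvBFind ps s i = some p) : p.toList <+: s.drop i := by
  induction ps with
  | nil => simp [pvBFind] at h
  | cons q tl ih =>
    simp only [pvBFind] at h
    split at h
    · cases h; exact List.isPrefixOf_iff_prefix.mp (by assumption)
    · exact ih h

theorem pvToList_ne_nil {p : String} (h : p ≠ "") : p.toList ≠ [] := by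
  intro hc
  apply h
  have h2 : p.toList = ("" : String).toList := by simpa using hc
  exact String.toList_inj.mp h2

theorem pvSeg (s : List Char) (i i' j : Nat) (h1 : i ≤ i') (h2 : i' ≤ j) :
    (s.take j).drop i = (s.take i').drop i ++ (s.take j).drop i' := by
  rw [List.drop_take, List.drop_take, List.drop_take]
  have hdd : (s.drop i).drop (i' - i) = s.drop i' := by
    rw [List.drop_drop]; congr 1; omega
  rw [← hdd, ← List.take_add]
  congr 1
  omega

theorem pvBLoop_le (ps : List String) (s : List Char) :
    ∀ f i, i ≤ pvBLoop ps s f i := by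
  intro f
  induction f with
  | zero => intro i; simp [pvBLoop]
  | succ f ih =>
    intro i
    rw [pvBLoop]
    cases h : pvBFind ps s i with
    | none => exact le_refl _
    | some q => exact le_trans (Nat.le_add_right _ _) (ih _)

theorem pvMain (ps : List String) (s : List Char) (hps : "" ∉ ps) :
    ∀ f i (out : List Char), i ≤ s.length → s.length - i < f →
      pvARec f ps (s.drop i) out =
        (if out ++ (s.take (pvBLoop ps s f i)).drop i = s.drop (pvBLoop ps s f i)
         then String.ofList (out ++ (s.take (pvBLoop ps s f i)).drop i) else "WRONG PASSWORD") := by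
  intro f
  induction f with
  | zero => intro i out h1 h2; omega
  | succ f ih =>
    intro i out h1 h2
    rw [pvARec, pvBLoop, pvScan_eq_find]
    cases hfind : pvBFind ps s i with
    | none =>
      dsimp only
      have hnil : (s.take i).drop i = ([] : List Char) := by
        rw [List.drop_take]; simp
      simp [hnil]
    | some p =>
      dsimp only
      have hmem := pvBFind_mem hfind
      have hpre := pvBFind_prefix hfind
      have hne : p.toList ≠ [] := pvToList_ne_nil (fun hc => hps (hc ▸ hmem))
      have hlen : 0 < p.toList.length := List.length_pos_iff.mpr hne
      have hple : p.toList.length ≤ s.length - i := by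
        have := hpre.length_le
        simpa using this
      set i' := i + p.toList.length with hi'
      have h1' : i' ≤ s.length := by omega
      have h2' : s.length - i' < f := by omega
      have hdrop : (s.drop i).drop p.toList.length = s.drop i' := by
        rw [List.drop_drop]
      have hp : p.toList = (s.take i').drop i := by
        rw [List.drop_take]
        have he : i' - i = p.toList.length := by omega
        rw [he]
        exact List.prefix_iff_eq_take.mp hpre
      rw [hdrop, ih i' (out ++ p.toList) h1' h2']
      have hmono : i' ≤ pvBLoop ps s f i' := pvBLoop_le ps s f i'
      rw [pvSeg s i i' (pvBLoop ps s f i') (by omega) hmono, ← hp, List.append_assoc]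

-- ===== VERDICT (by name: the statement is the Claim_ definition above) =====
theorem concatPasswords_spec : Claim_equal_concatPasswords := by
  intro ps la output _ hpre
  unfold Spec_concatPasswords concatPasswords concatPasswords_alt
  have h := pvMain ps la.toList hpre (la.toList.length + 1) 0
      (match output with | none => "" | some s => s).toList (Nat.zero_le _) (by omega)
  simp only [List.drop_zero] at h ⊢
  rw [h]
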